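-- pv_equiv track=rewrite | github.com/santiagocanepa/AutomationTrading-Strategy-Backtesting-Suite | suitetrading/src/suitetrading/data/downloader.py | _to_ccxt_symbol
-- ===== SOURCE A (Python) =====
-- def _to_ccxt_symbol(symbol: str) -> str:
--     """Convert exchange symbol like ``BTCUSDT`` to CCXT format ``BTC/USDT``.
--
--     Handles common quote currencies: USDT, BUSD, USDC, BTC, ETH, BNB.
--     """
--     if "/" in symbol:
--         return symbol  # already CCXT format
--     for quote in ("USDT", "BUSD", "USDC", "TUSD", "BTC", "ETH", "BNB"):
--         if symbol.endswith(quote):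
--             base = symbol[: -len(quote)]
--             if base:
--                 return f"{base}/{quote}"
--     return symbol  # fallback: return as-is
-- ===== SOURCE B (Python) =====
-- # B: a character-level automaton. The quote currencies are compiled once into a
-- # trie of their REVERSED spellings; the symbol is scanned backwards one char at
-- # a time through the trie, so the matching quote (unique: no quote is a suffix
-- # of another) is found without ever comparing whole suffixes.
-- _TRIE = {}
-- for _q in ("USDT", "BUSD", "USDC", "TUSD", "BTC", "ETH", "BNB"):
--     _node = _TRIE
--     for _c in reversed(_q):
--         _node = _node.setdefault(_c, {})
--     _node[""] = _q  # terminal marker: the quote spelled forwards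
--
-- def _to_ccxt_symbol(symbol: str) -> str:
--     if "/" in symbol:
--         return symbol  # already CCXT format
--     node, depth = _TRIE, 0
--     for ch in reversed(symbol):
--         node = node.get(ch)
--         if node is None:
--             return symbol
--         depth += 1
--         q = node.get("")
--         if q is not None:
--             return symbol[:-depth] + "/" + q if depth < len(symbol) else symbol
--     return symbol
-- ===== Notes on version B (the rewrite author's own statement) =====
-- stated objective: alternative
-- what changed: Replaces A's ordered loop of seven whole-suffix endswith tests with a character-level automaton: the reversed quote currencies are compiled once into a trie and the symbol is scanned backwards one character at a time through it (correct because no quote is a suffix of another, so the trie walk finds the unique matching quote).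
import Mathlib
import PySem

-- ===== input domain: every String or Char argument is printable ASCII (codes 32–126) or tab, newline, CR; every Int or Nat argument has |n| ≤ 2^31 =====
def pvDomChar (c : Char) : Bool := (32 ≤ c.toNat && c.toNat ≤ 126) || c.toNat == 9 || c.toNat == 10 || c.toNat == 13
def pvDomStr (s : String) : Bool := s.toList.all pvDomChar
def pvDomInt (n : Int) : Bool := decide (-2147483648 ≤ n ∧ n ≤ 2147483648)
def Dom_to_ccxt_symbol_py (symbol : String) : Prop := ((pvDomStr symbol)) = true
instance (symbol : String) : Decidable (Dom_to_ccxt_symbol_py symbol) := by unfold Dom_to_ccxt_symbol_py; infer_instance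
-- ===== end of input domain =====

-- B replaces A's ordered seven-quote endswith scan by a character-level automaton:
-- a trie of the reversed quotes is walked backwards through the symbol one char at a time (alternative decomposition).


-- ===== PORT A =====
-- the tuple of quote currencies A iterates over, in A's order
def pvQuotesA : List (List Char) :=
  [['U','S','D','T'], ['B','U','S','D'], ['U','S','D','C'], ['T','U','S','D'],
   ['B','T','C'], ['E','T','H'], ['B','N','B']]

-- A's for-loop: first quote that is a suffix with a non-empty base returns base+"/"+quote
def pvLoopA (s : List Char) : List (List Char) → List Char
  | [] => s
  | q :: qs =>
    if PySem.Chars.endswith s q then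
      let base := PySem.List.slice s none (some (-(q.length : Int)))
      if base ≠ [] then base ++ '/' :: q else pvLoopA s qs
    else pvLoopA s qs

def to_ccxt_symbol_py (symbol : String) : String :=
  if PySem.Chars.isIn ['/'] symbol.toList then symbol
  else String.ofList (pvLoopA symbol.toList pvQuotesA)

-- ===== PORT B =====
-- Source B builds _TRIE once at import time (nested dicts over the reversed quotes);
-- here the finished trie is the two tables pvKids (children) / pvTerm (terminal marker),
-- nodes numbered in the order setdefault creates them along each reversed quote.
def pvKids : Nat → List (Char × Nat)
  | 0 => [('T', 1), ('D', 2), ('C', 3), ('H', 4), ('B', 5)]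
  | 1 => [('D', 6)]
  | 2 => [('S', 7)]
  | 3 => [('D', 8), ('T', 9)]
  | 4 => [('T', 10)]
  | 5 => [('N', 11)]
  | 6 => [('S', 12)]
  | 7 => [('U', 13)]
  | 8 => [('S', 14)]
  | 9 => [('B', 15)]
  | 10 => [('E', 16)]
  | 11 => [('B', 17)]
  | 12 => [('U', 18)]
  | 13 => [('B', 19), ('T', 20)]
  | 14 => [('U', 21)]
  | _ => []

def pvTerm : Nat → Option (List Char)
  | 15 => some ['B','T','C']
  | 16 => some ['E','T','H']
  | 17 => some ['B','N','B']
  | 18 => some ['U','S','D','T']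
  | 19 => some ['B','U','S','D']
  | 20 => some ['T','U','S','D']
  | 21 => some ['U','S','D','C']
  | _ => none

-- B's for-loop over reversed(symbol): follow the trie; on a terminal split, on a miss return symbol
def pvWalkB (s : List Char) : List Char → Nat → Nat → List Char
  | [], _, _ => s
  | c :: rest, node, depth =>
    match (pvKids node).lookup c with
    | none => s
    | some v =>
      match pvTerm v with
      | some q =>
        if depth + 1 < s.length then
          PySem.List.slice s none (some (-((depth + 1 : Nat) : Int))) ++ '/' :: q
        else s
      | none => pvWalkB s rest v (depth + 1)

def to_ccxt_symbol_py_alt (symbol : String) : String :=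
  if PySem.Chars.isIn ['/'] symbol.toList then symbol
  else String.ofList (pvWalkB symbol.toList symbol.toList.reverse 0 0)

-- ===== PRECONDITION & SPEC =====
def Spec_to_ccxt_symbol_py (symbol : String) (out : String) : Prop := out = to_ccxt_symbol_py_alt symbol
instance (symbol : String) (out : String) : Decidable (Spec_to_ccxt_symbol_py symbol out) := by unfold Spec_to_ccxt_symbol_py; infer_instance

-- ===== CLAIM (what is proved, stated in full; the proofs are below) =====
def Claim_equal_to_ccxt_symbol_py : Prop := ∀ (symbol : String), Dom_to_ccxt_symbol_py symbol → Spec_to_ccxt_symbol_py symbol (to_ccxt_symbol_py symbol)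

-- ===== LEMMAS AND PROOFS =====

-- proof-side middle form: both A's scan and B's trie walk equal this suffix-table lookup
def pvQuotes4 : List (List Char) := [['U','S','D','T'], ['B','U','S','D'], ['U','S','D','C'], ['T','U','S','D']]
def pvQuotes3 : List (List Char) := [['B','T','C'], ['E','T','H'], ['B','N','B']]

def pvCoreB (s : List Char) : List Char :=
  if 4 < s.length ∧ pvQuotes4.contains (PySem.List.slice s (some (-4)) none) then
    PySem.List.slice s none (some (-4)) ++ '/' :: PySem.List.slice s (some (-4)) none
  else if 3 < s.length ∧ pvQuotes3.contains (PySem.List.slice s (some (-3)) none) then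
    PySem.List.slice s none (some (-3)) ++ '/' :: PySem.List.slice s (some (-3)) none
  else s

-- endswith = the |q|-length tail equals q
theorem endswith_char (s q : List Char) :
    PySem.Chars.endswith s q = true ↔ q.length ≤ s.length ∧ s.drop (s.length - q.length) = q := by
  rw [PySem.Chars.endswith_iff]
  constructor
  · rintro ⟨t, rfl⟩; simp
  · rintro ⟨_, hd⟩; exact hd ▸ List.drop_suffix _ _

-- strict form: once s is none of the quotes themselves, endswith forces a non-empty base
theorem endswith_strict (s q : List Char) (hs : s ≠ q) :
    PySem.Chars.endswith s q = true ↔ q.length < s.length ∧ s.drop (s.length - q.length) = q := by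
  rw [endswith_char]
  constructor
  · rintro ⟨hle, hd⟩
    rcases Nat.lt_or_ge q.length s.length with h | h
    · exact ⟨h, hd⟩
    · exact absurd (by simpa [Nat.le_antisymm hle h] using hd) hs
  · rintro ⟨hlt, hd⟩; exact ⟨Nat.le_of_lt hlt, hd⟩

theorem core_eq (s : List Char) : pvLoopA s pvQuotesA = pvCoreB s := by
  by_cases hs : s ∈ pvQuotesA
  · -- s is itself one of the seven quotes: both sides are concrete, decide
    simp only [pvQuotesA, List.mem_cons, List.not_mem_nil, or_false] at hs
    rcases hs with rfl | rfl | rfl | rfl | rfl | rfl | rfl <;> decide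
  · simp only [pvQuotesA, List.mem_cons, List.not_mem_nil, or_false, not_or] at hs
    obtain ⟨hs1, hs2, hs3, hs4, hs5, hs6, hs7⟩ := hs
    have e4to : PySem.List.slice s none (some (-4)) = s.take (s.length - 4) :=
      PySem.List.slice_to_neg_ofNat s 4 (by omega)
    have e4from : PySem.List.slice s (some (-4)) none = s.drop (s.length - 4) :=
      PySem.List.slice_from_neg_ofNat s 4 (by omega)
    have e3to : PySem.List.slice s none (some (-3)) = s.take (s.length - 3) :=
      PySem.List.slice_to_neg_ofNat s 3 (by omega)
    have e3from : PySem.List.slice s (some (-3)) none = s.drop (s.length - 3) :=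
      PySem.List.slice_from_neg_ofNat s 3 (by omega)
    have hbase : ∀ k : Nat, k < s.length → ¬ (s.take (s.length - k) = []) := by
      intro k hk h
      rcases List.take_eq_nil_iff.mp h with h0 | h0
      · omega
      · subst h0; simp at hk
    -- the seven endswith conditions, in strict (B-shaped) form
    have hU := endswith_strict s _ hs1
    have hB := endswith_strict s _ hs2
    have hC := endswith_strict s _ hs3
    have hT := endswith_strict s _ hs4
    have h5 := endswith_strict s _ hs5
    have h6 := endswith_strict s _ hs6
    have h7 := endswith_strict s _ hs7
    norm_num at hU hB hC hT h5 h6 h7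
    by_cases c4 : 4 < s.length ∧ s.drop (s.length - 4) ∈ pvQuotes4
    · obtain ⟨hn, hmem⟩ := c4
      simp only [pvQuotes4, List.mem_cons, List.not_mem_nil, or_false] at hmem
      have hb := hbase 4 hn
      rcases hmem with hq | hq | hq | hq
      · have t1 : PySem.Chars.endswith s ['U','S','D','T'] = true := hU.mpr ⟨hn, hq⟩
        simp only [pvLoopA, pvQuotesA, pvCoreB]
        norm_num [t1, e4to, e4from, hb, hq, hn, pvQuotes4]
      · have f1 : PySem.Chars.endswith s ['U','S','D','T'] = false := by
          rw [Bool.eq_false_iff]; intro h; obtain ⟨-, h⟩ := hU.mp h; rw [hq] at h; simp at h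
        have t2 : PySem.Chars.endswith s ['B','U','S','D'] = true := hB.mpr ⟨hn, hq⟩
        simp only [pvLoopA, pvQuotesA, pvCoreB]
        norm_num [f1, t2, e4to, e4from, hb, hq, hn, pvQuotes4]
      · have f1 : PySem.Chars.endswith s ['U','S','D','T'] = false := by
          rw [Bool.eq_false_iff]; intro h; obtain ⟨-, h⟩ := hU.mp h; rw [hq] at h; simp at h
        have f2 : PySem.Chars.endswith s ['B','U','S','D'] = false := by
          rw [Bool.eq_false_iff]; intro h; obtain ⟨-, h⟩ := hB.mp h; rw [hq] at h; simp at h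
        have t3 : PySem.Chars.endswith s ['U','S','D','C'] = true := hC.mpr ⟨hn, hq⟩
        simp only [pvLoopA, pvQuotesA, pvCoreB]
        norm_num [f1, f2, t3, e4to, e4from, hb, hq, hn, pvQuotes4]
      · have f1 : PySem.Chars.endswith s ['U','S','D','T'] = false := by
          rw [Bool.eq_false_iff]; intro h; obtain ⟨-, h⟩ := hU.mp h; rw [hq] at h; simp at h
        have f2 : PySem.Chars.endswith s ['B','U','S','D'] = false := by
          rw [Bool.eq_false_iff]; intro h; obtain ⟨-, h⟩ := hB.mp h; rw [hq] at h; simp at h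
        have f3 : PySem.Chars.endswith s ['U','S','D','C'] = false := by
          rw [Bool.eq_false_iff]; intro h; obtain ⟨-, h⟩ := hC.mp h; rw [hq] at h; simp at h
        have t4 : PySem.Chars.endswith s ['T','U','S','D'] = true := hT.mpr ⟨hn, hq⟩
        simp only [pvLoopA, pvQuotesA, pvCoreB]
        norm_num [f1, f2, f3, t4, e4to, e4from, hb, hq, hn, pvQuotes4]
    · -- no 4-letter quote applies: all four 4-letter endswith are false
      have no4 : ∀ q, q ∈ pvQuotes4 → ¬ (4 < s.length ∧ s.drop (s.length - 4) = q) := by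
        rintro q hq ⟨hn, hd⟩; exact c4 ⟨hn, hd ▸ hq⟩
      have f1 : PySem.Chars.endswith s ['U','S','D','T'] = false := by
        rw [Bool.eq_false_iff]; intro h; exact no4 _ (by simp [pvQuotes4]) (hU.mp h)
      have f2 : PySem.Chars.endswith s ['B','U','S','D'] = false := by
        rw [Bool.eq_false_iff]; intro h; exact no4 _ (by simp [pvQuotes4]) (hB.mp h)
      have f3 : PySem.Chars.endswith s ['U','S','D','C'] = false := by
        rw [Bool.eq_false_iff]; intro h; exact no4 _ (by simp [pvQuotes4]) (hC.mp h)
      have f4 : PySem.Chars.endswith s ['T','U','S','D'] = false := by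
        rw [Bool.eq_false_iff]; intro h; exact no4 _ (by simp [pvQuotes4]) (hT.mp h)
      by_cases c3 : 3 < s.length ∧ s.drop (s.length - 3) ∈ pvQuotes3
      · obtain ⟨hn, hmem⟩ := c3
        simp only [pvQuotes3, List.mem_cons, List.not_mem_nil, or_false] at hmem
        have hb := hbase 3 hn
        rcases hmem with hq | hq | hq
        · have t5 : PySem.Chars.endswith s ['B','T','C'] = true := h5.mpr ⟨hn, hq⟩
          simp only [pvLoopA, pvQuotesA, pvCoreB]
          norm_num [f1, f2, f3, f4, t5, e3to, e3from, e4from, hb, hq, hn, pvQuotes3, pvQuotes4, c4]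
          intro hn4 hd
          exact (c4 ⟨hn4, by simpa [pvQuotes4] using hd⟩).elim
        · have f5 : PySem.Chars.endswith s ['B','T','C'] = false := by
            rw [Bool.eq_false_iff]; intro h; obtain ⟨-, h⟩ := h5.mp h; rw [hq] at h; simp at h
          have t6 : PySem.Chars.endswith s ['E','T','H'] = true := h6.mpr ⟨hn, hq⟩
          simp only [pvLoopA, pvQuotesA, pvCoreB]
          norm_num [f1, f2, f3, f4, f5, t6, e3to, e3from, e4from, hb, hq, hn, pvQuotes3, pvQuotes4, c4]
          intro hn4 hd
          exact (c4 ⟨hn4, by simpa [pvQuotes4] using hd⟩).elim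
        · have f5 : PySem.Chars.endswith s ['B','T','C'] = false := by
            rw [Bool.eq_false_iff]; intro h; obtain ⟨-, h⟩ := h5.mp h; rw [hq] at h; simp at h
          have f6 : PySem.Chars.endswith s ['E','T','H'] = false := by
            rw [Bool.eq_false_iff]; intro h; obtain ⟨-, h⟩ := h6.mp h; rw [hq] at h; simp at h
          have t7 : PySem.Chars.endswith s ['B','N','B'] = true := h7.mpr ⟨hn, hq⟩
          simp only [pvLoopA, pvQuotesA, pvCoreB]
          norm_num [f1, f2, f3, f4, f5, f6, t7, e3to, e3from, e4from, hb, hq, hn, pvQuotes3, pvQuotes4, c4]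
          intro hn4 hd
          exact (c4 ⟨hn4, by simpa [pvQuotes4] using hd⟩).elim
      · have no3 : ∀ q, q ∈ pvQuotes3 → ¬ (3 < s.length ∧ s.drop (s.length - 3) = q) := by
          rintro q hq ⟨hn, hd⟩; exact c3 ⟨hn, hd ▸ hq⟩
        have f5 : PySem.Chars.endswith s ['B','T','C'] = false := by
          rw [Bool.eq_false_iff]; intro h; exact no3 _ (by simp [pvQuotes3]) (h5.mp h)
        have f6 : PySem.Chars.endswith s ['E','T','H'] = false := by
          rw [Bool.eq_false_iff]; intro h; exact no3 _ (by simp [pvQuotes3]) (h6.mp h)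
        have f7 : PySem.Chars.endswith s ['B','N','B'] = false := by
          rw [Bool.eq_false_iff]; intro h; exact no3 _ (by simp [pvQuotes3]) (h7.mp h)
        simp only [pvLoopA, pvQuotesA, pvCoreB]
        norm_num [f1, f2, f3, f4, f5, f6, f7, e3from, e4from, c4, c3]

lemma ch1 (x c1 : Char) : x = c1 ∨ ((x == c1) = false ∧ ¬ x = c1) := by
  by_cases h : x = c1
  · exact Or.inl h
  · exact Or.inr ⟨by simp [h], h⟩
lemma ch2 (x c1 c2 : Char) : x = c1 ∨ x = c2 ∨ ((x == c1) = false ∧ ¬ x = c1 ∧ (x == c2) = false ∧ ¬ x = c2) := by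
  by_cases h1 : x = c1
  · exact Or.inl h1
  by_cases h2 : x = c2
  · exact Or.inr (Or.inl h2)
  · exact Or.inr (Or.inr ⟨by simp [h1], h1, by simp [h2], h2⟩)
lemma ch5 (x c1 c2 c3 c4 c5 : Char) : x = c1 ∨ x = c2 ∨ x = c3 ∨ x = c4 ∨ x = c5 ∨
    ((x == c1) = false ∧ ¬ x = c1 ∧ (x == c2) = false ∧ ¬ x = c2 ∧ (x == c3) = false ∧ ¬ x = c3 ∧
     (x == c4) = false ∧ ¬ x = c4 ∧ (x == c5) = false ∧ ¬ x = c5) := by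
  by_cases h1 : x = c1
  · exact Or.inl h1
  by_cases h2 : x = c2
  · exact Or.inr (Or.inl h2)
  by_cases h3 : x = c3
  · exact Or.inr (Or.inr (Or.inl h3))
  by_cases h4 : x = c4
  · exact Or.inr (Or.inr (Or.inr (Or.inl h4)))
  by_cases h5 : x = c5
  · exact Or.inr (Or.inr (Or.inr (Or.inr (Or.inl h5))))
  · exact Or.inr (Or.inr (Or.inr (Or.inr (Or.inr ⟨by simp [h1], h1, by simp [h2], h2, by simp [h3], h3, by simp [h4], h4, by simp [h5], h5⟩))))

theorem walk_core (r : List Char) : pvWalkB r.reverse r 0 0 = pvCoreB r.reverse := by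
  match r with
  | [] => rfl
  | [a] =>
    rcases ch5 a 'T' 'D' 'C' 'H' 'B' with rfl|rfl|rfl|rfl|rfl|⟨ha0,ha0p,ha1,ha1p,ha2,ha2p,ha3,ha3p,ha4,ha4p⟩
    · simp [pvWalkB, pvKids, pvTerm, List.lookup, pvCoreB, pvQuotes4, pvQuotes3]
    · simp [pvWalkB, pvKids, pvTerm, List.lookup, pvCoreB, pvQuotes4, pvQuotes3]
    · simp [pvWalkB, pvKids, pvTerm, List.lookup, pvCoreB, pvQuotes4, pvQuotes3]
    · simp [pvWalkB, pvKids, pvTerm, List.lookup, pvCoreB, pvQuotes4, pvQuotes3]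
    · simp [pvWalkB, pvKids, pvTerm, List.lookup, pvCoreB, pvQuotes4, pvQuotes3]
    · simp [pvWalkB, pvKids, pvTerm, List.lookup, pvCoreB, pvQuotes4, pvQuotes3, ha0, ha0p, ha1, ha1p, ha2, ha2p, ha3, ha3p, ha4, ha4p]
  | [a, b] =>
    rcases ch5 a 'T' 'D' 'C' 'H' 'B' with rfl|rfl|rfl|rfl|rfl|⟨ha0,ha0p,ha1,ha1p,ha2,ha2p,ha3,ha3p,ha4,ha4p⟩
    · rcases ch1 b 'D' with rfl|⟨hb0,hb0p⟩
      · simp [pvWalkB, pvKids, pvTerm, List.lookup, pvCoreB, pvQuotes4, pvQuotes3]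
      · simp [pvWalkB, pvKids, pvTerm, List.lookup, pvCoreB, pvQuotes4, pvQuotes3, hb0, hb0p]
    · rcases ch1 b 'S' with rfl|⟨hb0,hb0p⟩
      · simp [pvWalkB, pvKids, pvTerm, List.lookup, pvCoreB, pvQuotes4, pvQuotes3]
      · simp [pvWalkB, pvKids, pvTerm, List.lookup, pvCoreB, pvQuotes4, pvQuotes3, hb0, hb0p]
    · rcases ch2 b 'D' 'T' with rfl|rfl|⟨hb0,hb0p,hb1,hb1p⟩
      · simp [pvWalkB, pvKids, pvTerm, List.lookup, pvCoreB, pvQuotes4, pvQuotes3]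
      · simp [pvWalkB, pvKids, pvTerm, List.lookup, pvCoreB, pvQuotes4, pvQuotes3]
      · simp [pvWalkB, pvKids, pvTerm, List.lookup, pvCoreB, pvQuotes4, pvQuotes3, hb0, hb0p, hb1, hb1p]
    · rcases ch1 b 'T' with rfl|⟨hb0,hb0p⟩
      · simp [pvWalkB, pvKids, pvTerm, List.lookup, pvCoreB, pvQuotes4, pvQuotes3]
      · simp [pvWalkB, pvKids, pvTerm, List.lookup, pvCoreB, pvQuotes4, pvQuotes3, hb0, hb0p]
    · rcases ch1 b 'N' with rfl|⟨hb0,hb0p⟩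
      · simp [pvWalkB, pvKids, pvTerm, List.lookup, pvCoreB, pvQuotes4, pvQuotes3]
      · simp [pvWalkB, pvKids, pvTerm, List.lookup, pvCoreB, pvQuotes4, pvQuotes3, hb0, hb0p]
    · simp [pvWalkB, pvKids, pvTerm, List.lookup, pvCoreB, pvQuotes4, pvQuotes3, ha0, ha0p, ha1, ha1p, ha2, ha2p, ha3, ha3p, ha4, ha4p]
  | [a, b, c] =>
    rcases ch5 a 'T' 'D' 'C' 'H' 'B' with rfl|rfl|rfl|rfl|rfl|⟨ha0,ha0p,ha1,ha1p,ha2,ha2p,ha3,ha3p,ha4,ha4p⟩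
    · rcases ch1 b 'D' with rfl|⟨hb0,hb0p⟩
      · rcases ch1 c 'S' with rfl|⟨hc0,hc0p⟩
        · simp [pvWalkB, pvKids, pvTerm, List.lookup, pvCoreB, pvQuotes4, pvQuotes3]
        · simp [pvWalkB, pvKids, pvTerm, List.lookup, pvCoreB, pvQuotes4, pvQuotes3, hc0, hc0p]
      · simp [pvWalkB, pvKids, pvTerm, List.lookup, pvCoreB, pvQuotes4, pvQuotes3, hb0, hb0p]
    · rcases ch1 b 'S' with rfl|⟨hb0,hb0p⟩
      · rcases ch1 c 'U' with rfl|⟨hc0,hc0p⟩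
        · simp [pvWalkB, pvKids, pvTerm, List.lookup, pvCoreB, pvQuotes4, pvQuotes3]
        · simp [pvWalkB, pvKids, pvTerm, List.lookup, pvCoreB, pvQuotes4, pvQuotes3, hc0, hc0p]
      · simp [pvWalkB, pvKids, pvTerm, List.lookup, pvCoreB, pvQuotes4, pvQuotes3, hb0, hb0p]
    · rcases ch2 b 'D' 'T' with rfl|rfl|⟨hb0,hb0p,hb1,hb1p⟩
      · rcases ch1 c 'S' with rfl|⟨hc0,hc0p⟩
        · simp [pvWalkB, pvKids, pvTerm, List.lookup, pvCoreB, pvQuotes4, pvQuotes3]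
        · simp [pvWalkB, pvKids, pvTerm, List.lookup, pvCoreB, pvQuotes4, pvQuotes3, hc0, hc0p]
      · rcases ch1 c 'B' with rfl|⟨hc0,hc0p⟩
        · simp [pvWalkB, pvKids, pvTerm, List.lookup, pvCoreB, pvQuotes4, pvQuotes3]
        · simp [pvWalkB, pvKids, pvTerm, List.lookup, pvCoreB, pvQuotes4, pvQuotes3, hc0, hc0p]
      · simp [pvWalkB, pvKids, pvTerm, List.lookup, pvCoreB, pvQuotes4, pvQuotes3, hb0, hb0p, hb1, hb1p]
    · rcases ch1 b 'T' with rfl|⟨hb0,hb0p⟩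
      · rcases ch1 c 'E' with rfl|⟨hc0,hc0p⟩
        · simp [pvWalkB, pvKids, pvTerm, List.lookup, pvCoreB, pvQuotes4, pvQuotes3]
        · simp [pvWalkB, pvKids, pvTerm, List.lookup, pvCoreB, pvQuotes4, pvQuotes3, hc0, hc0p]
      · simp [pvWalkB, pvKids, pvTerm, List.lookup, pvCoreB, pvQuotes4, pvQuotes3, hb0, hb0p]
    · rcases ch1 b 'N' with rfl|⟨hb0,hb0p⟩
      · rcases ch1 c 'B' with rfl|⟨hc0,hc0p⟩
        · simp [pvWalkB, pvKids, pvTerm, List.lookup, pvCoreB, pvQuotes4, pvQuotes3]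
        · simp [pvWalkB, pvKids, pvTerm, List.lookup, pvCoreB, pvQuotes4, pvQuotes3, hc0, hc0p]
      · simp [pvWalkB, pvKids, pvTerm, List.lookup, pvCoreB, pvQuotes4, pvQuotes3, hb0, hb0p]
    · simp [pvWalkB, pvKids, pvTerm, List.lookup, pvCoreB, pvQuotes4, pvQuotes3, ha0, ha0p, ha1, ha1p, ha2, ha2p, ha3, ha3p, ha4, ha4p]
  | a :: b :: c :: d :: rest =>
    have e4f : PySem.List.slice (rest.reverse ++ [d, c, b, a]) (some (-4)) none = [d, c, b, a] := by
      rw [PySem.List.slice_from_neg_ofNat _ 4 (by norm_num)]; simp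
    have e4t : PySem.List.slice (rest.reverse ++ [d, c, b, a]) none (some (-4)) = rest.reverse := by
      rw [PySem.List.slice_to_neg_ofNat _ 4 (by norm_num)]; simp
    have e3f : PySem.List.slice (rest.reverse ++ [d, c, b, a]) (some (-3)) none = [c, b, a] := by
      rw [PySem.List.slice_from_neg_ofNat _ 3 (by norm_num)]
      rw [show (rest.reverse ++ [d, c, b, a]).length - 3 = rest.reverse.length + 1 from by simp]
      rw [List.drop_append]; simp
    have e3t : PySem.List.slice (rest.reverse ++ [d, c, b, a]) none (some (-3)) = rest.reverse ++ [d] := by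
      rw [PySem.List.slice_to_neg_ofNat _ 3 (by norm_num)]
      rw [show (rest.reverse ++ [d, c, b, a]).length - 3 = rest.reverse.length + 1 from by simp]
      rw [List.take_append]; simp
    rcases ch5 a 'T' 'D' 'C' 'H' 'B' with rfl|rfl|rfl|rfl|rfl|⟨ha0,ha0p,ha1,ha1p,ha2,ha2p,ha3,ha3p,ha4,ha4p⟩
    · rcases ch1 b 'D' with rfl|⟨hb0,hb0p⟩
      · rcases ch1 c 'S' with rfl|⟨hc0,hc0p⟩
        · rcases ch1 d 'U' with rfl|⟨hd0,hd0p⟩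
          · simp [pvWalkB, pvKids, pvTerm, List.lookup, pvCoreB, pvQuotes4, pvQuotes3, e4f, e4t, e3f, e3t]
          · simp [pvWalkB, pvKids, pvTerm, List.lookup, pvCoreB, pvQuotes4, pvQuotes3, e4f, e4t, e3f, e3t, hd0, hd0p]
        · simp [pvWalkB, pvKids, pvTerm, List.lookup, pvCoreB, pvQuotes4, pvQuotes3, e4f, e4t, e3f, e3t, hc0, hc0p]
      · simp [pvWalkB, pvKids, pvTerm, List.lookup, pvCoreB, pvQuotes4, pvQuotes3, e4f, e4t, e3f, e3t, hb0, hb0p]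
    · rcases ch1 b 'S' with rfl|⟨hb0,hb0p⟩
      · rcases ch1 c 'U' with rfl|⟨hc0,hc0p⟩
        · rcases ch2 d 'B' 'T' with rfl|rfl|⟨hd0,hd0p,hd1,hd1p⟩
          · simp [pvWalkB, pvKids, pvTerm, List.lookup, pvCoreB, pvQuotes4, pvQuotes3, e4f, e4t, e3f, e3t]
          · simp [pvWalkB, pvKids, pvTerm, List.lookup, pvCoreB, pvQuotes4, pvQuotes3, e4f, e4t, e3f, e3t]
          · simp [pvWalkB, pvKids, pvTerm, List.lookup, pvCoreB, pvQuotes4, pvQuotes3, e4f, e4t, e3f, e3t, hd0, hd0p, hd1, hd1p]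
        · simp [pvWalkB, pvKids, pvTerm, List.lookup, pvCoreB, pvQuotes4, pvQuotes3, e4f, e4t, e3f, e3t, hc0, hc0p]
      · simp [pvWalkB, pvKids, pvTerm, List.lookup, pvCoreB, pvQuotes4, pvQuotes3, e4f, e4t, e3f, e3t, hb0, hb0p]
    · rcases ch2 b 'D' 'T' with rfl|rfl|⟨hb0,hb0p,hb1,hb1p⟩
      · rcases ch1 c 'S' with rfl|⟨hc0,hc0p⟩
        · rcases ch1 d 'U' with rfl|⟨hd0,hd0p⟩
          · simp [pvWalkB, pvKids, pvTerm, List.lookup, pvCoreB, pvQuotes4, pvQuotes3, e4f, e4t, e3f, e3t]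
          · simp [pvWalkB, pvKids, pvTerm, List.lookup, pvCoreB, pvQuotes4, pvQuotes3, e4f, e4t, e3f, e3t, hd0, hd0p]
        · simp [pvWalkB, pvKids, pvTerm, List.lookup, pvCoreB, pvQuotes4, pvQuotes3, e4f, e4t, e3f, e3t, hc0, hc0p]
      · rcases ch1 c 'B' with rfl|⟨hc0,hc0p⟩
        · simp [pvWalkB, pvKids, pvTerm, List.lookup, pvCoreB, pvQuotes4, pvQuotes3, e4f, e4t, e3f, e3t]
        · simp [pvWalkB, pvKids, pvTerm, List.lookup, pvCoreB, pvQuotes4, pvQuotes3, e4f, e4t, e3f, e3t, hc0, hc0p]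
      · simp [pvWalkB, pvKids, pvTerm, List.lookup, pvCoreB, pvQuotes4, pvQuotes3, e4f, e4t, e3f, e3t, hb0, hb0p, hb1, hb1p]
    · rcases ch1 b 'T' with rfl|⟨hb0,hb0p⟩
      · rcases ch1 c 'E' with rfl|⟨hc0,hc0p⟩
        · simp [pvWalkB, pvKids, pvTerm, List.lookup, pvCoreB, pvQuotes4, pvQuotes3, e4f, e4t, e3f, e3t]
        · simp [pvWalkB, pvKids, pvTerm, List.lookup, pvCoreB, pvQuotes4, pvQuotes3, e4f, e4t, e3f, e3t, hc0, hc0p]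
      · simp [pvWalkB, pvKids, pvTerm, List.lookup, pvCoreB, pvQuotes4, pvQuotes3, e4f, e4t, e3f, e3t, hb0, hb0p]
    · rcases ch1 b 'N' with rfl|⟨hb0,hb0p⟩
      · rcases ch1 c 'B' with rfl|⟨hc0,hc0p⟩
        · simp [pvWalkB, pvKids, pvTerm, List.lookup, pvCoreB, pvQuotes4, pvQuotes3, e4f, e4t, e3f, e3t]
        · simp [pvWalkB, pvKids, pvTerm, List.lookup, pvCoreB, pvQuotes4, pvQuotes3, e4f, e4t, e3f, e3t, hc0, hc0p]
      · simp [pvWalkB, pvKids, pvTerm, List.lookup, pvCoreB, pvQuotes4, pvQuotes3, e4f, e4t, e3f, e3t, hb0, hb0p]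
    · simp [pvWalkB, pvKids, pvTerm, List.lookup, pvCoreB, pvQuotes4, pvQuotes3, e4f, e4t, e3f, e3t, ha0, ha0p, ha1, ha1p, ha2, ha2p, ha3, ha3p, ha4, ha4p]

-- ===== VERDICT (by name: the statement is the Claim_ definition above) =====
theorem to_ccxt_symbol_py_spec : Claim_equal_to_ccxt_symbol_py := by
  intro symbol _
  unfold Spec_to_ccxt_symbol_py to_ccxt_symbol_py to_ccxt_symbol_py_alt
  by_cases h : PySem.Chars.isIn ['/'] symbol.toList = true
  · simp [h]
  · have := walk_core symbol.toList.reverse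
    rw [List.reverse_reverse] at this
    simp [h, core_eq, this]
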